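-- pv_equiv track=rewrite | github.com/wbatek/aoc2023 | day09/main.py | generate_layers
-- ===== SOURCE A (Python) =====
-- def generate_layers(series: list) -> list:
--     length = len(series)
--
--     layers = [series]
--     all_zeros = False
--     while not all_zeros:
--         layer = []
--         for i in range(length - len(layers)):
--             layer.append(layers[-1][i + 1] - layers[-1][i])
--         layers.append(layer)
--         all_zeros = all([x == 0 for x in layer])
--     return layers
-- ===== SOURCE B (Python) =====
-- def generate_layers(series: list) -> list:
--     diff = [b - a for a, b in zip(series, series[1:])]
--     if all(x == 0 for x in diff):
--         return [series, diff]
--     return [series] + generate_layers(diff)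
-- ===== Notes on version B (the rewrite author's own statement) =====
-- stated objective: simpler
-- what changed: Replaces the imperative while-loop over a growing layers list with indexed access into the global length by a direct recursion on the difference layer computed via zip, returning [series, diff] once diff is all zeros.
import Mathlib
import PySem

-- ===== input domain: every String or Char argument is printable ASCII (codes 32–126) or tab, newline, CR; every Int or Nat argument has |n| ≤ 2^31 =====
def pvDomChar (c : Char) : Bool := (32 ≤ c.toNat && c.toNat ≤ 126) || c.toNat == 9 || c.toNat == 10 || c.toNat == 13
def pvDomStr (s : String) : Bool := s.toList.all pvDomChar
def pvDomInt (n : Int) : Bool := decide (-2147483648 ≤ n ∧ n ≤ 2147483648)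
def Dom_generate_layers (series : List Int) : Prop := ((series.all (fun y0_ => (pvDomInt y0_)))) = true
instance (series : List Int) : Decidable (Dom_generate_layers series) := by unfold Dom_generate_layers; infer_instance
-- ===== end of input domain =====

-- B replaces A's imperative while-loop (growing `layers` list, layer length derived from the
-- global input length) by a direct recursion on the zip-computed difference layer: same values,
-- different decomposition (objective: simpler).

-- ===== PORT A =====
-- A's while-loop ported as fuel recursion; fuel series.length + 1 provably exceeds the number of
-- iterations (once len(layers) reaches length the new layer is empty and all([]) stops the loop).
def glA_loop (length : Int) (fuel : Nat) (layers : List (List Int)) : List (List Int) :=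
  match fuel with
  | 0 => layers
  | f + 1 =>
    let prev := PySem.List.pyGetD layers (-1) []   -- layers[-1]; layers is never empty
    let layer := (PySem.List.pyRange 0 (length - layers.length) 1).foldl
      (fun acc i => acc ++ [PySem.List.pyGetD prev (i + 1) 0 - PySem.List.pyGetD prev i 0]) []
    let layers' := layers ++ [layer]
    if layer.all (fun x => x == 0) then layers' else glA_loop length f layers'

def generate_layers (series : List Int) : List (List Int) :=
  glA_loop (PySem.List.len series) (series.length + 1) [series]

-- ===== PORT B =====
def pyDiff (xs : List Int) : List Int := (xs.zip xs.tail).map (fun p => p.2 - p.1)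

def generate_layers_alt (series : List Int) : List (List Int) :=
  let diff := pyDiff series
  if diff.all (fun x => x == 0) then [series, diff]
  else series :: generate_layers_alt diff
termination_by series.length
decreasing_by
  rename_i h
  rw [show diff = pyDiff series from rfl] at h
  have hlen : (pyDiff series).length = min series.length (series.length - 1) := by
    simp [pyDiff]
  have hne : pyDiff series ≠ [] := by
    intro hnil; rw [hnil] at h; simp at h
  have hpos : 0 < (pyDiff series).length := List.length_pos_iff.mpr hne
  omega

-- ===== PRECONDITION & SPEC =====
def Spec_generate_layers (series : List Int) (out : List (List Int)) : Prop := out = generate_layers_alt series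
instance (series : List Int) (out : List (List Int)) : Decidable (Spec_generate_layers series out) := by unfold Spec_generate_layers; infer_instance

-- ===== CLAIM (what is proved, stated in full; the proofs are below) =====
def Claim_equal_generate_layers : Prop := ∀ (series : List Int), Dom_generate_layers series → Spec_generate_layers series (generate_layers series)

-- ===== LEMMAS AND PROOFS =====

-- The layer A builds from the last layer `prev` is exactly B's zip difference of `prev`.
lemma layer_eq_pyDiff (prev : List Int) :
    (PySem.List.pyRange 0 ((prev.length : Int) - 1) 1).map
      (fun i => PySem.List.pyGetD prev (i + 1) 0 - PySem.List.pyGetD prev i 0) = pyDiff prev := by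
  apply List.ext_getElem
  · simp only [List.length_map, PySem.List.length_pyRange_one, pyDiff, List.length_zip,
      List.length_tail]
    omega
  · intro k h1 h2
    have hkl : k < ((prev.length : Int) - 1).toNat := by
      simpa [PySem.List.length_pyRange_one] using h1
    have hk1 : k + 1 < prev.length := by omega
    have hk0 : k < prev.length := by omega
    simp only [List.getElem_map, PySem.List.getElem_pyRange_one, zero_add]
    have c1 : ((k : Int) + 1) = ((k + 1 : Nat) : Int) := by push_cast; ring
    rw [c1, PySem.List.pyGetD_natCast, PySem.List.pyGetD_natCast]
    simp [pyDiff, List.getD, List.getElem_tail, List.getElem?_eq_getElem hk1,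
      List.getElem?_eq_getElem hk0]

lemma glA_loop_eq (fuel : Nat) :
    ∀ (pre : List (List Int)) (prev : List Int) (L : Int),
      L = (pre.length : Int) + prev.length →
      prev.length + 1 ≤ fuel →
      glA_loop L fuel (pre ++ [prev]) = pre ++ generate_layers_alt prev := by
  induction fuel with
  | zero => intro _ _ _ _ h; omega
  | succ f ih =>
    intro pre prev L hL hfuel
    rw [glA_loop]
    simp only [PySem.List.pyGetD_neg_one_append_singleton]
    have hn : L - ((pre ++ [prev]).length : Int) = (prev.length : Int) - 1 := by
      simp only [hL, List.length_append, List.length_cons, List.length_nil]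
      push_cast; ring
    rw [hn, PySem.List.foldl_append_singleton_eq_map, List.nil_append, layer_eq_pyDiff]
    rw [generate_layers_alt]
    by_cases hz : (pyDiff prev).all (fun x => x == 0)
    · simp [hz]
    · simp only [hz, Bool.false_eq_true, if_false]
      have hne : pyDiff prev ≠ [] := by
        intro h; rw [h] at hz; simp at hz
      have hdlen : (pyDiff prev).length = prev.length - 1 := by
        simp only [pyDiff, List.length_map, List.length_zip, List.length_tail]
        omega
      have hpos : 1 ≤ (pyDiff prev).length := List.length_pos_iff.mpr hne
      have := ih (pre ++ [prev]) (pyDiff prev) L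
        (by subst hL
            simp only [List.length_append, List.length_cons, List.length_nil]
            omega)
        (by omega)
      simpa using this

-- ===== VERDICT (by name: the statement is the Claim_ definition above) =====
theorem generate_layers_spec : Claim_equal_generate_layers := by
  intro series _
  unfold Spec_generate_layers generate_layers
  have := glA_loop_eq (series.length + 1) [] series (PySem.List.len series)
    (by simp [PySem.List.len_eq]) (by omega)
  simpa using this
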